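-- pv_equiv track=rewrite | github.com/keerthi15-dev/meme_project | ai_service/voice_inventory.py | _search_inventory
-- ===== SOURCE A (Python) =====
-- from typing import Dict, List, Optional
--
-- def _search_inventory(product_query: str, inventory_db: Dict) -> Optional[Dict]:
--     """
--     Search inventory database for product
--     Simple fuzzy matching for demo
--     """
--     product_query_lower = product_query.lower()
--
--     # Try exact match first
--     for product_name, data in inventory_db.items():
--         if product_name.lower() == product_query_lower:
--             return data
--
--     # Try partial match
--     for product_name, data in inventory_db.items():
--         if product_query_lower in product_name.lower() or product_name.lower() in product_query_lower:
--             return data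
--
--     return None
-- ===== SOURCE B (Python) =====
-- from typing import Dict, Optional
--
-- def _search_inventory(product_query: str, inventory_db: Dict) -> Optional[Dict]:
--     """Single pass: return on exact match immediately; remember the first
--     partial match and return it after the loop if no exact match exists."""
--     q = product_query.lower()
--     first_partial = None
--     for product_name, data in inventory_db.items():
--         name = product_name.lower()
--         if name == q:
--             return data
--         if first_partial is None and (q in name or name in q):
--             first_partial = data
--     return first_partial
-- ===== Notes on version B (the rewrite author's own statement) =====
-- stated objective: simpler
-- what changed: Replaced A's two full scans (exact pass then partial pass) by a single loop that returns on exact match and carries the first partial match in an accumulator.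
import Mathlib
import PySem

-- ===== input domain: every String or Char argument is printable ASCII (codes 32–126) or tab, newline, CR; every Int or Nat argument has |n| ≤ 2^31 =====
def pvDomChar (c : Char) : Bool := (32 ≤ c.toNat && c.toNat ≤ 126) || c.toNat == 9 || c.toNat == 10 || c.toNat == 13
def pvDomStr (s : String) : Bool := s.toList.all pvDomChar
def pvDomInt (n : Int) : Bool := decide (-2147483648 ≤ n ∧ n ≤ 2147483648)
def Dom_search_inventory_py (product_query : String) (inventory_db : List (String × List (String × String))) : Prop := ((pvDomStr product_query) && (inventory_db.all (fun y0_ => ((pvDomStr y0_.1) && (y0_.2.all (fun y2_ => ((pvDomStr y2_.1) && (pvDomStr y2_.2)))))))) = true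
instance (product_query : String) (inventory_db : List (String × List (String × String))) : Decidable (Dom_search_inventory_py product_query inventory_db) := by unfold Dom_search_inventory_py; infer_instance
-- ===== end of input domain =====

-- B replaces A's two full scans (exact pass, then partial pass) by one loop that returns on an exact match and carries the first partial match; same result, simpler.


-- ===== PORT A =====
-- first loop of A: exact case-insensitive match
def pvExactA (ql : String) : List (String × List (String × String)) → Option (List (String × String))
  | [] => none
  | (name, data) :: rest =>
    if PySem.Str.lower name == ql then some data else pvExactA ql rest

-- second loop of A: bidirectional substring match
def pvPartialA (ql : String) : List (String × List (String × String)) → Option (List (String × String))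
  | [] => none
  | (name, data) :: rest =>
    if PySem.Str.isIn ql (PySem.Str.lower name) || PySem.Str.isIn (PySem.Str.lower name) ql then
      some data
    else pvPartialA ql rest

def search_inventory_py (product_query : String) (inventory_db : List (String × List (String × String))) : Option (List (String × String)) :=
  let ql := PySem.Str.lower product_query
  match pvExactA ql inventory_db with
  | some data => some data
  | none => pvPartialA ql inventory_db

-- ===== PORT B =====
-- B's single loop: return on exact match, carry the first partial match
def pvScanB (ql : String) : List (String × List (String × String)) → Option (List (String × String)) → Option (List (String × String))
  | [], firstPartial => firstPartial
  | (name, data) :: rest, firstPartial =>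
    let nl := PySem.Str.lower name
    if nl == ql then some data
    else
      pvScanB ql rest
        (if firstPartial.isNone && (PySem.Str.isIn ql nl || PySem.Str.isIn nl ql) then some data
         else firstPartial)

def search_inventory_py_alt (product_query : String) (inventory_db : List (String × List (String × String))) : Option (List (String × String)) :=
  pvScanB (PySem.Str.lower product_query) inventory_db none

-- ===== PRECONDITION & SPEC =====
def Spec_search_inventory_py (product_query : String) (inventory_db : List (String × List (String × String))) (out : Option (List (String × String))) : Prop := out = search_inventory_py_alt product_query inventory_db
instance (product_query : String) (inventory_db : List (String × List (String × String))) (out : Option (List (String × String))) : Decidable (Spec_search_inventory_py product_query inventory_db out) := by unfold Spec_search_inventory_py; infer_instance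

-- ===== CLAIM (what is proved, stated in full; the proofs are below) =====
def Claim_equal_search_inventory_py : Prop := ∀ (product_query : String) (inventory_db : List (String × List (String × String))), Dom_search_inventory_py product_query inventory_db → Spec_search_inventory_py product_query inventory_db (search_inventory_py product_query inventory_db)

-- ===== LEMMAS AND PROOFS =====

-- ===== VERDICT (by name: the statement is the Claim_ definition above) =====
theorem pvScanB_eq (ql : String) (db : List (String × List (String × String)))
    (fp : Option (List (String × String))) :
    pvScanB ql db fp =
      match pvExactA ql db with
      | some d => some d
      | none => match fp with
        | some x => some x
        | none => pvPartialA ql db := by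
  induction db generalizing fp with
  | nil => cases fp <;> simp [pvScanB, pvExactA, pvPartialA]
  | cons hd rest ih =>
    obtain ⟨name, data⟩ := hd
    by_cases hx : (PySem.Str.lower name == ql) = true
    · simp [pvScanB, pvExactA, hx]
    · simp only [pvScanB, pvExactA, pvPartialA, hx, if_neg, Bool.false_eq_true,
        not_false_eq_true, ih]
      cases fp with
      | some x => simp
      | none =>
        cases pvExactA ql rest <;>
          simp only [Option.isNone_none, Bool.true_and] <;> (split_ifs <;> simp)

theorem search_inventory_py_spec : Claim_equal_search_inventory_py := by
  intro q db _
  unfold Spec_search_inventory_py search_inventory_py search_inventory_py_alt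
  rw [pvScanB_eq]
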